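-- pv_equiv track=rewrite | github.com/483759/AlgorithmSolutionStorage | python/17069.py | solution
-- ===== SOURCE A (Python) =====
-- def solution(s):
--     if len(s)==1: return 0
--     if len(s)==2:
--         if s[0]==s[1]: return 0
--         return 2
--
--     if s[0]==s[-1]:
--         return solution(s[1:-1])
--
--     if s[1]!=s[-1] and s[0]!=s[-2]: return 2
--
--     m=2
--     if s[1]==s[-1]:
--         m=min(m,solution(s[1:]))
--     if s[0]==s[-2]:
--         m=min(m,solution(s[:-1]))
--
--     if m==0: return 1
--     return m
-- ===== SOURCE B (Python) =====
-- def solution(s):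
--     n = len(s)
--     dp = {}
--     for L in range(1, n + 1):
--         for i in range(0, n - L + 1):
--             j = i + L
--             if L == 1:
--                 v = 0
--             elif L == 2:
--                 v = 0 if s[i] == s[j - 1] else 2
--             elif s[i] == s[j - 1]:
--                 v = dp[(i + 1, j - 1)]
--             elif s[i + 1] != s[j - 1] and s[i] != s[j - 2]:
--                 v = 2
--             else:
--                 m = 2
--                 if s[i + 1] == s[j - 1]:
--                     m = min(m, dp[(i + 1, j)])
--                 if s[i] == s[j - 2]:
--                     m = min(m, dp[(i, j - 1)])
--                 v = 1 if m == 0 else m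
--             dp[(i, j)] = v
--     return dp[(0, n)]
-- ===== Notes on version B (the rewrite author's own statement) =====
-- stated objective: alternative
-- what changed: Replaces the branching recursion on string slices with an iterative bottom-up dynamic-programming table over (start,end) index pairs, computing each substring's class once.
import Mathlib
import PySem

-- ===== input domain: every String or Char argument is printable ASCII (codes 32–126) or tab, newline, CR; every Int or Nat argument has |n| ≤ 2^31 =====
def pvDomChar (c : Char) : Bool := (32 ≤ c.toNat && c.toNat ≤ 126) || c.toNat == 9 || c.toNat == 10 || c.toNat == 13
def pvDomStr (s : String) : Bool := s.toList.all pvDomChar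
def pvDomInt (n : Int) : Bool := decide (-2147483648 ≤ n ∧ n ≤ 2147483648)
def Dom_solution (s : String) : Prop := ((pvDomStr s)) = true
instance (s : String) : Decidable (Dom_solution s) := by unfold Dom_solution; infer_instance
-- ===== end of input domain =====

-- B replaces A's branching recursion on string slices by an iterative bottom-up DP table
-- over (start, end) index pairs (objective: alternative; not measured faster).

-- ===== PORT A =====
-- A, step for step, over the character list. The 'cs.length < 3' guard only makes the
-- recursion total where Python raises IndexError (the empty string, excluded by
-- Pre_solution) — lengths 1 and 2 are already handled by the branches above it.
def fA (cs : List Char) : Int :=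
  if cs.length = 1 then 0
  else if cs.length = 2 then
    (if PySem.List.pyGetD cs 0 ' ' = PySem.List.pyGetD cs 1 ' ' then 0 else 2)
  else if _h3 : cs.length < 3 then 0
  else if PySem.List.pyGetD cs 0 ' ' = PySem.List.pyGetD cs (-1) ' ' then
    fA (PySem.List.slice cs (some 1) (some (-1)))
  else if PySem.List.pyGetD cs 1 ' ' ≠ PySem.List.pyGetD cs (-1) ' ' ∧
          PySem.List.pyGetD cs 0 ' ' ≠ PySem.List.pyGetD cs (-2) ' ' then 2
  else
    let m : Int := 2
    let m1 := if PySem.List.pyGetD cs 1 ' ' = PySem.List.pyGetD cs (-1) ' '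
              then min m (fA (PySem.List.slice cs (some 1) none)) else m
    let m2 := if PySem.List.pyGetD cs 0 ' ' = PySem.List.pyGetD cs (-2) ' '
              then min m1 (fA (PySem.List.slice cs none (some (-1)))) else m1
    if m2 = 0 then 1 else m2
termination_by cs.length
decreasing_by
  · rw [PySem.List.length_slice, PySem.List.clampIdx_neg_one,
      show (1:Int) = ((1:Nat):Int) by simp, PySem.List.clampIdx_natCast]
    omega
  · simp only [PySem.List.slice_from_one, List.length_tail]
    omega
  · simp only [PySem.List.slice_to_neg_one, List.length_dropLast]
    omega

def solution (s : String) : Int := fA s.toList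

-- ===== PORT B =====
-- the body computed for dp[(i, j)] in Source B (L = j - i); the dp lookups that Python
-- does with dp[(…)] are getD with default 0 — inside the loops the key is present.
def cellB (cs : List Char) (d : PySem.Dict (Int × Int) Int) (i j L : Int) : Int :=
  if L = 1 then 0
  else if L = 2 then
    (if PySem.List.pyGetD cs i ' ' = PySem.List.pyGetD cs (j - 1) ' ' then 0 else 2)
  else if PySem.List.pyGetD cs i ' ' = PySem.List.pyGetD cs (j - 1) ' ' then
    d.getD (i + 1, j - 1) 0
  else if PySem.List.pyGetD cs (i + 1) ' ' ≠ PySem.List.pyGetD cs (j - 1) ' ' ∧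
          PySem.List.pyGetD cs i ' ' ≠ PySem.List.pyGetD cs (j - 2) ' ' then 2
  else
    let m : Int := 2
    let m1 := if PySem.List.pyGetD cs (i + 1) ' ' = PySem.List.pyGetD cs (j - 1) ' '
              then min m (d.getD (i + 1, j) 0) else m
    let m2 := if PySem.List.pyGetD cs i ' ' = PySem.List.pyGetD cs (j - 2) ' '
              then min m1 (d.getD (i, j - 1) 0) else m1
    if m2 = 0 then 1 else m2

-- the inner 'for i in range(0, n - L + 1)' loop of Source B
def innerFold (cs : List Char) (n L : Int) (d : PySem.Dict (Int × Int) Int) :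
    PySem.Dict (Int × Int) Int :=
  (PySem.List.pyRange 0 (n - L + 1) 1).foldl
    (fun d i => d.insert (i, i + L) (cellB cs d i (i + L) L)) d

def solution_alt (s : String) : Int :=
  let cs := s.toList
  let n : Int := PySem.List.len cs
  let dp := (PySem.List.pyRange 1 (n + 1) 1).foldl (fun d L => innerFold cs n L d)
    PySem.Dict.empty
  dp.getD (0, n) 0

-- ===== PRECONDITION & SPEC =====
-- Pre_ excludes only the empty string, on which both Pythons raise (A: IndexError, B: KeyError).
def Pre_solution (s : String) : Prop := s.toList ≠ []
instance (s : String) : Decidable (Pre_solution s) := by unfold Pre_solution; infer_instance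
def pvWitness_solution : String := "aba"

def Spec_solution (s : String) (out : Int) : Prop := out = solution_alt s
instance (s : String) (out : Int) : Decidable (Spec_solution s out) := by unfold Spec_solution; infer_instance

-- ===== CLAIM (what is proved, stated in full; the proofs are below) =====
def Claim_equal_solution : Prop := ∀ (s : String), Dom_solution s → Pre_solution s → Spec_solution s (solution s)

-- ===== LEMMAS AND PROOFS =====

-- the substring cs[i:j] as a list
def sub (cs : List Char) (i j : Nat) : List Char := (cs.drop i).take (j - i)

theorem length_sub (cs : List Char) (i j : Nat) (hj : j ≤ cs.length) :
    (sub cs i j).length = j - i := by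
  simp [sub]; omega

theorem sub_getElem? (cs : List Char) (i j k : Nat) (hk : k < j - i) :
    (sub cs i j)[k]? = cs[i + k]? := by
  simp [sub, hk, List.getElem?_drop]

theorem getD_sub (cs : List Char) (i j k : Nat) (_hj : j ≤ cs.length) (hk : k < j - i) (d : Char) :
    PySem.List.pyGetD (sub cs i j) (k : Int) d = cs.getD (i + k) d := by
  rw [PySem.List.pyGetD_natCast, List.getD_eq_getElem?_getD, List.getD_eq_getElem?_getD,
    sub_getElem? cs i j k hk]

theorem getD_sub_neg (cs : List Char) (i j k : Nat) (hj : j ≤ cs.length)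
    (hk0 : 0 < k) (hk : i + k ≤ j) (d : Char) :
    PySem.List.pyGetD (sub cs i j) (-(k : Int)) d = cs.getD (j - k) d := by
  rw [PySem.List.pyGetD_neg_natCast _ _ _ hk0 (by rw [length_sub cs i j hj]; omega)]
  rw [List.getElem_eq_iff, length_sub cs i j hj]
  rw [sub_getElem? cs i j (j - i - k) (by omega)]
  rw [List.getD_eq_getElem?_getD]
  rw [show i + (j - i - k) = j - k by omega]
  rw [List.getElem?_eq_getElem (by omega)]
  simp

theorem sub_tail (cs : List Char) (i j : Nat) :
    (sub cs i j).tail = sub cs (i + 1) j := by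
  rw [sub, ← List.drop_one, List.drop_take, List.drop_drop, sub]
  congr 1

theorem sub_dropLast (cs : List Char) (i j : Nat) (hj : j ≤ cs.length) (hij : i < j) :
    (sub cs i j).dropLast = sub cs i (j - 1) := by
  rw [List.dropLast_eq_take, length_sub cs i j hj, sub, List.take_take, sub]
  congr 1
  omega

theorem sub_slice_mid (cs : List Char) (i j : Nat) (hj : j ≤ cs.length) (hij : i + 2 ≤ j) :
    PySem.List.slice (sub cs i j) (some 1) (some (-1)) = sub cs (i + 1) (j - 1) := by
  have h1 : PySem.List.slice (sub cs i j) (some 1) (some (-1))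
      = ((sub cs i j).drop (PySem.List.clampIdx (sub cs i j).length 1)).take
        (PySem.List.clampIdx (sub cs i j).length (-1)
          - PySem.List.clampIdx (sub cs i j).length 1) := rfl
  rw [h1, PySem.List.clampIdx_neg_one,
    show (1:Int) = ((1:Nat):Int) by simp, PySem.List.clampIdx_natCast,
    length_sub cs i j hj]
  rw [show min 1 (j - i) = 1 by omega, List.drop_one, sub_tail, sub, sub, List.take_take]
  congr 1
  omega

theorem sub_slice_tail (cs : List Char) (i j : Nat) :
    PySem.List.slice (sub cs i j) (some 1) none = sub cs (i + 1) j := by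
  rw [PySem.List.slice_from_one, sub_tail]

theorem sub_slice_init (cs : List Char) (i j : Nat) (hj : j ≤ cs.length) (hij : i < j) :
    PySem.List.slice (sub cs i j) none (some (-1)) = sub cs i (j - 1) := by
  rw [PySem.List.slice_to_neg_one, sub_dropLast cs i j hj hij]

-- cellB computes fA of the corresponding substring, given a dict that is correct on
-- all shorter substrings
theorem cell_correct (cs : List Char) (d : PySem.Dict (Int × Int) Int) (i L : Nat)
    (hL : 1 ≤ L) (hiL : i + L ≤ cs.length)
    (hd : ∀ (i' L' : Nat), 1 ≤ L' → i' + L' ≤ cs.length → L' < L →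
      d.getD ((i' : Int), (i' : Int) + (L' : Int)) 0 = fA (sub cs i' (i' + L'))) :
    cellB cs d (i : Int) ((i : Int) + (L : Int)) (L : Int) = fA (sub cs i (i + L)) := by
  have e0 : PySem.List.pyGetD (sub cs i (i + L)) 0 ' ' = cs.getD i ' ' := by
    rw [show (0:Int) = ((0:Nat):Int) by simp, getD_sub cs i (i + L) 0 hiL (by omega)]
    norm_num
  by_cases hL1 : L = 1
  · subst hL1
    rw [fA, cellB]
    simp [length_sub cs i (i + 1) hiL]
  by_cases hL2 : L = 2
  · subst hL2
    have e1 : PySem.List.pyGetD (sub cs i (i + 2)) 1 ' ' = cs.getD (i + 1) ' ' := by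
      rw [show (1:Int) = ((1:Nat):Int) by simp, getD_sub cs i (i + 2) 1 hiL (by omega)]
    rw [fA, cellB]
    simp only [length_sub cs i (i + 2) hiL, show i + 2 - i = 2 from by omega, Nat.cast_ofNat]
    norm_num
    rw [e0, e1, show ((i:Int) + 2 - 1) = ((i + 1 : Nat) : Int) by omega]
    simp only [PySem.List.pyGetD_natCast, List.getD_eq_getElem?_getD]
  -- L ≥ 3
  have hL3 : 3 ≤ L := by omega
  have e1 : PySem.List.pyGetD (sub cs i (i + L)) 1 ' ' = cs.getD (i + 1) ' ' := by
    rw [show (1:Int) = ((1:Nat):Int) by simp, getD_sub cs i (i + L) 1 hiL (by omega)]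
  have em1 : PySem.List.pyGetD (sub cs i (i + L)) (-1) ' ' = cs.getD (i + L - 1) ' ' := by
    rw [show (-1:Int) = -((1:Nat):Int) by simp, getD_sub_neg cs i (i + L) 1 hiL (by omega) (by omega)]
  have em2 : PySem.List.pyGetD (sub cs i (i + L)) (-2) ' ' = cs.getD (i + L - 2) ' ' := by
    rw [show (-2:Int) = -((2:Nat):Int) by simp, getD_sub_neg cs i (i + L) 2 hiL (by omega) (by omega)]
  have sA : PySem.List.slice (sub cs i (i + L)) (some 1) (some (-1)) = sub cs (i + 1) (i + L - 1) :=
    sub_slice_mid cs i (i + L) hiL (by omega)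
  have sT : PySem.List.slice (sub cs i (i + L)) (some 1) none = sub cs (i + 1) (i + L) :=
    sub_slice_tail cs i (i + L)
  have sI : PySem.List.slice (sub cs i (i + L)) none (some (-1)) = sub cs i (i + L - 1) :=
    sub_slice_init cs i (i + L) hiL (by omega)
  -- the three dict lookups cellB makes
  have g1 : d.getD (((i + 1 : Nat) : Int), ((i + L - 1 : Nat) : Int)) 0
      = fA (sub cs (i + 1) (i + L - 1)) := by
    have h := hd (i + 1) (L - 2) (by omega) (by omega) (by omega)
    rw [show (((i + 1 : Nat) : Int) + ((L - 2 : Nat) : Int)) = ((i + L - 1 : Nat) : Int) by omega,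
      show (i + 1) + (L - 2) = i + L - 1 by omega] at h
    exact h
  have g2 : d.getD (((i + 1 : Nat) : Int), ((i + L : Nat) : Int)) 0
      = fA (sub cs (i + 1) (i + L)) := by
    have h := hd (i + 1) (L - 1) (by omega) (by omega) (by omega)
    rw [show (((i + 1 : Nat) : Int) + ((L - 1 : Nat) : Int)) = ((i + L : Nat) : Int) by omega,
      show (i + 1) + (L - 1) = i + L by omega] at h
    exact h
  have g3 : d.getD (((i : Nat) : Int), ((i + L - 1 : Nat) : Int)) 0
      = fA (sub cs i (i + L - 1)) := by
    have h := hd i (L - 1) (by omega) (by omega) (by omega)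
    rw [show (((i : Nat) : Int) + ((L - 1 : Nat) : Int)) = ((i + L - 1 : Nat) : Int) by omega,
      show i + (L - 1) = i + L - 1 by omega] at h
    exact h
  rw [fA, cellB]
  simp only [length_sub cs i (i + L) hiL, show i + L - i = L from by omega]
  rw [if_neg (show ¬(L = 1) from hL1), if_neg (show ¬(L = 2) from hL2),
    dif_neg (show ¬(L < 3) from by omega),
    if_neg (show ¬(((L : Nat) : Int) = 1) from by omega),
    if_neg (show ¬(((L : Nat) : Int) = 2) from by omega)]
  rw [e0, e1, em1, em2, sA, sT, sI]
  rw [show ((i:Int) + (L:Int) - 1) = ((i + L - 1 : Nat) : Int) by omega,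
    show ((i:Int) + (L:Int) - 2) = ((i + L - 2 : Nat) : Int) by omega,
    show ((i:Int) + 1) = ((i + 1 : Nat) : Int) by omega,
    show ((i:Int) + (L:Int)) = ((i + L : Nat) : Int) by omega]
  rw [g1, g2, g3]
  simp only [PySem.List.pyGetD_natCast]

-- the inner loop extends the invariant from lengths < L to all lengths ≤ L
theorem inner_loop (cs : List Char) (L : Nat) (hL : 1 ≤ L) (hLn : L ≤ cs.length) :
    ∀ (k a : Nat) (d : PySem.Dict (Int × Int) Int),
      cs.length + 1 - L - a ≤ k →
      (∀ (i' L' : Nat), 1 ≤ L' → i' + L' ≤ cs.length → (L' < L ∨ (L' = L ∧ i' < a)) →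
        d.getD ((i' : Int), (i' : Int) + (L' : Int)) 0 = fA (sub cs i' (i' + L'))) →
      ∀ (i' L' : Nat), 1 ≤ L' → i' + L' ≤ cs.length → L' ≤ L →
        ((PySem.List.pyRange (a : Int) ((cs.length : Int) - (L : Int) + 1) 1).foldl
          (fun d i => d.insert (i, i + (L : Int)) (cellB cs d i (i + (L : Int)) (L : Int))) d).getD
          ((i' : Int), (i' : Int) + (L' : Int)) 0 = fA (sub cs i' (i' + L')) := by
  intro k
  induction k with
  | zero =>
    intro a d hk hd i' L' h1 h2 h3
    rw [PySem.List.pyRange_one_eq_nil (by omega : ((cs.length : Int) - (L : Int) + 1) ≤ (a : Int))]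
    simp only [List.foldl_nil]
    refine hd i' L' h1 h2 ?_
    by_cases hE : L' = L
    · exact Or.inr ⟨hE, by omega⟩
    · exact Or.inl (by omega)
  | succ k ih =>
    intro a d hk hd i' L' h1 h2 h3
    by_cases hab : (a : Int) < (cs.length : Int) - (L : Int) + 1
    · rw [PySem.List.pyRange_one_cons hab, List.foldl_cons]
      have hd' : ∀ (i2 L2 : Nat), 1 ≤ L2 → i2 + L2 ≤ cs.length →
          (L2 < L ∨ (L2 = L ∧ i2 < a + 1)) →
          (d.insert ((a : Int), (a : Int) + (L : Int))
            (cellB cs d (a : Int) ((a : Int) + (L : Int)) (L : Int))).getD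
            ((i2 : Int), (i2 : Int) + (L2 : Int)) 0 = fA (sub cs i2 (i2 + L2)) := by
        intro i2 L2 g1 g2 g3
        rw [PySem.Dict.getD_insert]
        by_cases he : (((i2 : Nat) : Int), ((i2 : Nat) : Int) + ((L2 : Nat) : Int))
            = (((a : Nat) : Int), ((a : Nat) : Int) + ((L : Nat) : Int))
        · rw [if_pos he]
          have hia : i2 = a ∧ L2 = L := by
            have q1 := congrArg Prod.fst he
            have q2 := congrArg Prod.snd he
            simp only at q1 q2
            omega
          rcases hia with ⟨e1, e2⟩
          subst e1; subst e2
          exact cell_correct cs d i2 L2 g1 g2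
            (fun i3 L3 u1 u2 u3 => hd i3 L3 u1 u2 (Or.inl u3))
        · rw [if_neg he]
          refine hd i2 L2 g1 g2 ?_
          rcases g3 with h | ⟨hE, hlt⟩
          · exact Or.inl h
          · by_cases hia : i2 = a
            · exfalso; apply he; subst hia; subst hE; rfl
            · exact Or.inr ⟨hE, by omega⟩
      have hres := ih (a + 1) _ (by omega) hd' i' L' h1 h2 h3
      rw [show ((a : Int) + 1) = ((a + 1 : Nat) : Int) by omega]
      exact hres
    · rw [PySem.List.pyRange_one_eq_nil (by omega)]
      simp only [List.foldl_nil]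
      refine hd i' L' h1 h2 ?_
      by_cases hE : L' = L
      · exact Or.inr ⟨hE, by omega⟩
      · exact Or.inl (by omega)

theorem outer_loop (cs : List Char) : ∀ (M : Nat), M ≤ cs.length →
    ∀ (i' L' : Nat), 1 ≤ L' → L' ≤ M → i' + L' ≤ cs.length →
      ((PySem.List.pyRange 1 ((M : Int) + 1) 1).foldl
        (fun d L => innerFold cs (cs.length : Int) L d) PySem.Dict.empty).getD
        ((i' : Int), (i' : Int) + (L' : Int)) 0 = fA (sub cs i' (i' + L')) := by
  intro M
  induction M with
  | zero =>
    intro _ i' L' h1 h2 h3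
    exact absurd h2 (by omega)
  | succ M ih =>
    intro hM i' L' h1 h2 h3
    rw [show ((M + 1 : Nat) : Int) = (M : Int) + 1 by push_cast; ring,
      PySem.List.pyRange_one_succ_right (by omega : (1 : Int) ≤ (M : Int) + 1),
      List.foldl_append]
    simp only [List.foldl_cons, List.foldl_nil]
    have happ := inner_loop cs (M + 1) (by omega) (by omega)
      (cs.length + 1 - (M + 1)) 0
      ((PySem.List.pyRange 1 ((M : Int) + 1) 1).foldl
        (fun d L => innerFold cs (cs.length : Int) L d) PySem.Dict.empty)
      (by omega)
      (by
        intro i2 L2 g1 g2 g3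
        rcases g3 with h | ⟨_, hlt⟩
        · exact ih (by omega) i2 L2 g1 (by omega) g2
        · exact absurd hlt (by omega))
      i' L' h1 h3 h2
    simp only [Nat.cast_zero, Nat.cast_add, Nat.cast_one] at happ
    rw [innerFold]
    exact happ

-- ===== VERDICT (by name: the statement is the Claim_ definition above) =====
theorem solution_spec : Claim_equal_solution := by
  intro s _hdom hpre
  unfold Spec_solution solution solution_alt
  have hne : s.toList ≠ [] := hpre
  have hlen : 1 ≤ s.toList.length := by
    cases h : s.toList with
    | nil => exact absurd h hne
    | cons x xs => simp
  simp only [PySem.List.len_eq]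
  have h := outer_loop s.toList s.toList.length le_rfl 0 s.toList.length hlen le_rfl (by omega)
  simp only [Nat.cast_zero, zero_add] at h
  rw [h]
  rw [show sub s.toList 0 s.toList.length = s.toList by
    simp only [sub, List.drop_zero, Nat.sub_zero, List.take_length]]
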